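-- pv_equiv track=rewrite | github.com/dormbase/dormbase | dormbase/menus/views.py | fix_bonapetit
-- ===== SOURCE A (Python) =====
-- def fix_bonapetit(thestr):
--     """
--     Horrible state-machine to parse the unhtmlified RSS feed and get
--     the title and description.
--     """
--     food = {}
--     last = ''
--     build = ''
--     for char in thestr:
--         if char == '[':
--             continue
--         if char == ']':
--             last = build
--             build = ''
--             continue
--         if char == '\n':
--             if build is not '':
--                 food[last.strip()] = build.strip()
--                 build = ''
--             continue
--         build += char
--     return food
-- ===== SOURCE B (Python) =====
-- def fix_bonapetit(thestr):
--     """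
--     Split-based parse of the unhtmlified RSS feed: one record per line,
--     key = text before the last ']' (brackets dropped), value = text after it.
--     """
--     food = {}
--     last = ''
--     lines = thestr.split('\n')
--     for i, line in enumerate(lines):
--         parts = line.replace('[', '').split(']')
--         if len(parts) > 1:
--             last = parts[-2]
--         # only newline-terminated records carry a value
--         if i < len(lines) - 1 and parts[-1] != '':
--             food[last.strip()] = parts[-1].strip()
--     return food
-- ===== Notes on version B (the rewrite author's own statement) =====
-- stated objective: alternative
-- what changed: Replaces A's character-by-character state machine (per-char mutated last/build accumulators) with a split-based scan: the string is split into lines, each line has opening brackets removed and is split on closing brackets, the key is the second-to-last segment and the value the last one, and only newline-terminated lines assign into the dict.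
import Mathlib
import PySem

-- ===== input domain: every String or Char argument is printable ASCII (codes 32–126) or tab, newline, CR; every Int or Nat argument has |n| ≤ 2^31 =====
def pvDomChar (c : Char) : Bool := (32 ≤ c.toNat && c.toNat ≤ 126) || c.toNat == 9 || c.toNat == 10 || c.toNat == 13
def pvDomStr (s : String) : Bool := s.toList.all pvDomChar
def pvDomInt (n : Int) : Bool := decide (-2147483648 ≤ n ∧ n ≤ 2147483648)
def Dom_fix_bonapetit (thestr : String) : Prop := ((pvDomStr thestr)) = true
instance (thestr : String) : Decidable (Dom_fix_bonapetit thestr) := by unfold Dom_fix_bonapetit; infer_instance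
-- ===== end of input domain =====

-- B replaces A's char-by-char state machine with a split('\n')/split(']') line scan; objective: simpler decomposition, same results.

-- ===== PORT A =====
-- state = (food, last, build); Python's `build is not ''` is `build != ''` (CPython interns '')
def pvStepA (st : PySem.Dict String String × List Char × List Char) (c : Char) :
    PySem.Dict String String × List Char × List Char :=
  if c = '[' then st
  else if c = ']' then (st.1, st.2.2, [])
  else if c = '\n' then
    if st.2.2 ≠ [] then
      (st.1.insert (String.mk (PySem.Chars.strip st.2.1)) (String.mk (PySem.Chars.strip st.2.2)),
        st.2.1, [])
    else st
  else (st.1, st.2.1, st.2.2 ++ [c])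

def fix_bonapetit (thestr : String) : List (String × String) :=
  (thestr.toList.foldl pvStepA (PySem.Dict.empty, [], [])).1.items

-- ===== PORT B =====
-- one step of `for i, line in enumerate(lines)`; n = len(lines)
def pvStepB (n : Nat) (st : PySem.Dict String String × List Char) (p : List Char × Nat) :
    PySem.Dict String String × List Char :=
  let parts := PySem.Chars.splitOn (PySem.Chars.replace p.1 ['['] []) [']']
  let last := if 1 < parts.length then ((PySem.List.pyGet? parts (-2)).getD []) else st.2
  let value := (PySem.List.pyGet? parts (-1)).getD []
  if p.2 < n - 1 ∧ value ≠ [] then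
    (st.1.insert (String.mk (PySem.Chars.strip last)) (String.mk (PySem.Chars.strip value)), last)
  else (st.1, last)

def fix_bonapetit_alt (thestr : String) : List (String × String) :=
  let lines := PySem.Chars.splitOn thestr.toList ['\n']
  ((lines.zipIdx.foldl (pvStepB lines.length) (PySem.Dict.empty, []))).1.items

-- ===== PRECONDITION & SPEC =====
def Spec_fix_bonapetit (thestr : String) (out : List (String × String)) : Prop := out = fix_bonapetit_alt thestr
instance (thestr : String) (out : List (String × String)) : Decidable (Spec_fix_bonapetit thestr out) := by unfold Spec_fix_bonapetit; infer_instance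

-- ===== CLAIM (what is proved, stated in full; the proofs are below) =====
def Claim_equal_fix_bonapetit : Prop := ∀ (thestr : String), Dom_fix_bonapetit thestr → Spec_fix_bonapetit thestr (fix_bonapetit thestr)

-- ===== LEMMAS AND PROOFS =====

-- reference single-character splitter (= str.split(c) semantics)
def pvSplit1 (c : Char) : List Char → List Char → List (List Char)
  | [], cur => [cur.reverse]
  | x :: t, cur => if x = c then cur.reverse :: pvSplit1 c t [] else pvSplit1 c t (x :: cur)

theorem pvSplit1_ne_nil (c : Char) (l cur : List Char) : pvSplit1 c l cur ≠ [] := by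
  induction l generalizing cur with
  | nil => simp [pvSplit1]
  | cons x t ih => by_cases h : x = c <;> simp [pvSplit1, h, ih]

theorem pvGo_single (c : Char) : ∀ (fuel : Nat) (l cur : List Char) (acc : List (List Char)),
    l.length ≤ fuel →
    PySem.Chars.splitOn.go [c] fuel l cur acc = acc.reverse ++ pvSplit1 c l cur := by
  intro fuel
  induction fuel with
  | zero =>
    intro l cur acc h
    have hl : l = [] := by cases l <;> simp_all
    subst hl
    simp [PySem.Chars.splitOn.go, pvSplit1]
  | succ f ih =>
    intro l cur acc h
    cases l with
    | nil => simp [PySem.Chars.splitOn.go, pvSplit1]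
    | cons x t =>
      by_cases hx : c = x
      · subst hx
        have e : PySem.Chars.splitOn.go [c] (f+1) (c::t) cur acc
            = PySem.Chars.splitOn.go [c] f t [] (cur.reverse :: acc) := by
          simp [PySem.Chars.splitOn.go, List.isPrefixOf]
        rw [e, ih t [] _ (Nat.le_of_succ_le_succ (by simpa using h))]
        simp [pvSplit1]
      · have e : PySem.Chars.splitOn.go [c] (f+1) (x::t) cur acc
            = PySem.Chars.splitOn.go [c] f t (x :: cur) acc := by
          simp [PySem.Chars.splitOn.go, List.isPrefixOf, fun h => hx h]
        rw [e, ih t (x :: cur) _ (Nat.le_of_succ_le_succ (by simpa using h))]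
        have : x ≠ c := fun h => hx h.symm
        simp [pvSplit1, this]

theorem pvSplitOn_eq (c : Char) (l : List Char) :
    PySem.Chars.splitOn l [c] = pvSplit1 c l [] := by
  unfold PySem.Chars.splitOn
  rw [pvGo_single c (l.length + 1) l [] [] (by omega)]
  simp

theorem pvReplaceGo : ∀ (fuel : Nat) (l acc : List Char), l.length ≤ fuel →
    PySem.Chars.replace.go ['['] [] fuel l acc =
      acc.reverse ++ l.filter (fun x => !(x == '[')) := by
  intro fuel
  induction fuel with
  | zero =>
    intro l acc h
    have hl : l = [] := by cases l <;> simp_all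
    subst hl
    simp [PySem.Chars.replace.go]
  | succ f ih =>
    intro l acc h
    cases l with
    | nil => simp [PySem.Chars.replace.go]
    | cons x t =>
      by_cases hx : x = '['
      · subst hx
        have e : PySem.Chars.replace.go ['['] [] (f+1) ('['::t) acc
            = PySem.Chars.replace.go ['['] [] f t acc := by
          simp [PySem.Chars.replace.go, List.isPrefixOf]
        rw [e, ih t _ (Nat.le_of_succ_le_succ (by simpa using h))]
        simp
      · have hx' : ('[' : Char) ≠ x := Ne.symm hx
        have e : PySem.Chars.replace.go ['['] [] (f+1) (x::t) acc
            = PySem.Chars.replace.go ['['] [] f t (x :: acc) := by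
          simp [PySem.Chars.replace.go, List.isPrefixOf, hx']
        rw [e, ih t _ (Nat.le_of_succ_le_succ (by simpa using h))]
        simp [hx]

theorem pvReplace_eq (l : List Char) :
    PySem.Chars.replace l ['['] [] = l.filter (fun x => !(x == '[')) := by
  unfold PySem.Chars.replace
  rw [if_neg (by simp)]
  rw [pvReplaceGo l.length l [] le_rfl]
  simp

def pvPartsOf (l : List Char) : List (List Char) :=
  pvSplit1 ']' (l.filter (fun x => !(x == '['))) []

def pvNewLast (last : List Char) (parts : List (List Char)) : List Char :=
  if 1 < parts.length then parts.getD (parts.length - 2) [] else last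

def pvLoopB (food : PySem.Dict String String) (last : List Char) :
    List (List Char) → PySem.Dict String String
  | [] => food
  | [_] => food
  | l :: l' :: ls =>
      let parts := pvPartsOf l
      let last' := pvNewLast last parts
      let v := parts.getLastD []
      pvLoopB
        (if v ≠ [] then
          food.insert (String.mk (PySem.Chars.strip last')) (String.mk (PySem.Chars.strip v))
        else food) last' (l' :: ls)

theorem pvNewLast_cons (last b : List Char) (P : List (List Char)) (hP : P ≠ []) :
    pvNewLast last (b :: P) = pvNewLast b P := by
  cases P with
  | nil => exact absurd rfl hP
  | cons p ps =>
    cases ps with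
    | nil => simp [pvNewLast]
    | cons q qs =>
      simp only [pvNewLast, List.length_cons]
      rw [if_pos (by omega), if_pos (by omega)]
      have e : qs.length + 1 + 1 + 1 - 2 = (qs.length + 1 + 1 - 2) + 1 := by omega
      rw [e, List.getD_cons_succ]

theorem pvGetLastD_ne {α : Type} (P : List α) (h : P ≠ []) (d e : α) :
    P.getLastD d = P.getLastD e := by
  cases P with
  | nil => exact absurd rfl h
  | cons b l => rw [List.getLastD_cons, List.getLastD_cons]

theorem pvLineFold : ∀ (l : List Char), '\n' ∉ l →
    ∀ (food : PySem.Dict String String) (last build : List Char),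
    List.foldl pvStepA (food, last, build) l =
      (food,
       pvNewLast last (pvSplit1 ']' (l.filter (fun x => !(x == '['))) build.reverse),
       (pvSplit1 ']' (l.filter (fun x => !(x == '['))) build.reverse).getLastD []) := by
  intro l
  induction l with
  | nil =>
    intro _ food last build
    simp [pvSplit1, pvNewLast]
  | cons x t ih =>
    intro hl food last build
    have hx : x ≠ '\n' := fun e => hl (by simp [e])
    have ht : '\n' ∉ t := fun e => hl (by simp [e])
    by_cases h1 : x = '['
    · subst h1
      simp only [List.foldl_cons]
      have e : pvStepA (food, last, build) '[' = (food, last, build) := by simp [pvStepA]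
      rw [e, ih ht food last build]
      simp
    · by_cases h2 : x = ']'
      · subst h2
        simp only [List.foldl_cons]
        have e : pvStepA (food, last, build) ']' = (food, build, []) := by simp [pvStepA]
        rw [e, ih ht food build []]
        have hfil : (']' :: t).filter (fun x => !(x == '[')) = ']' :: t.filter (fun x => !(x == '[')) := by
          simp
        rw [hfil]
        have hs : pvSplit1 ']' (']' :: t.filter (fun x => !(x == '['))) build.reverse
            = build :: pvSplit1 ']' (t.filter (fun x => !(x == '['))) [] := by
          simp [pvSplit1]
        rw [hs]
        have hne := pvSplit1_ne_nil ']' (t.filter (fun x => !(x == '['))) []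
        rw [pvNewLast_cons last build _ hne]
        rw [List.getLastD_cons, pvGetLastD_ne _ hne build []]
        simp
      · simp only [List.foldl_cons]
        have e : pvStepA (food, last, build) x = (food, last, build ++ [x]) := by
          simp [pvStepA, h1, h2, hx]
        rw [e, ih ht food last (build ++ [x])]
        have hfil : (x :: t).filter (fun y => !(y == '[')) = x :: t.filter (fun y => !(y == '[')) := by
          simp [h1]
        rw [hfil]
        have hs : pvSplit1 ']' (x :: t.filter (fun y => !(y == '['))) build.reverse
            = pvSplit1 ']' (t.filter (fun y => !(y == '['))) (x :: build.reverse) := by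
          simp [pvSplit1, h2]
        rw [hs]
        simp

theorem pvSplit1_no_sep (c : Char) (l : List Char) (h : c ∉ l) :
    ∀ cur, pvSplit1 c l cur = [cur.reverse ++ l] := by
  induction l with
  | nil => intro cur; simp [pvSplit1]
  | cons x t ih =>
    intro cur
    have hx : x ≠ c := fun e => h (by simp [e])
    have ht : c ∉ t := fun e => h (by simp [e])
    rw [show pvSplit1 c (x :: t) cur = pvSplit1 c t (x :: cur) from by simp [pvSplit1, hx]]
    rw [ih ht (x :: cur)]
    simp

theorem pvSplit1_append_sep (c : Char) (l r : List Char) (h : c ∉ l) :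
    ∀ cur, pvSplit1 c (l ++ c :: r) cur = (cur.reverse ++ l) :: pvSplit1 c r [] := by
  induction l with
  | nil => intro cur; simp [pvSplit1]
  | cons x t ih =>
    intro cur
    have hx : x ≠ c := fun e => h (by simp [e])
    have ht : c ∉ t := fun e => h (by simp [e])
    rw [show (x :: t) ++ c :: r = x :: (t ++ c :: r) from rfl]
    rw [show pvSplit1 c (x :: (t ++ c :: r)) cur = pvSplit1 c (t ++ c :: r) (x :: cur) from by
      simp [pvSplit1, hx]]
    rw [ih ht (x :: cur)]
    simp

theorem pvFirstNl : ∀ (cs : List Char), '\n' ∈ cs →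
    ∃ l r, '\n' ∉ l ∧ cs = l ++ '\n' :: r := by
  intro cs h
  induction cs with
  | nil => cases h
  | cons x t ih =>
    by_cases hx : x = '\n'
    · exact ⟨[], t, by simp, by simp [hx]⟩
    · have hmem : '\n' ∈ t := by
        rcases List.mem_cons.mp h with h' | h'
        · exact absurd h'.symm hx
        · exact h'
      obtain ⟨l, r, hl, ht⟩ := ih hmem
      refine ⟨x :: l, r, ?_, by simp [ht]⟩
      intro hmem2
      rcases List.mem_cons.mp hmem2 with h' | h'
      · exact hx h'.symm
      · exact hl h'

theorem pvStepA_nl (food : PySem.Dict String String) (last build : List Char) :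
    pvStepA (food, last, build) '\n' =
      if _h : build ≠ [] then
        (food.insert (String.mk (PySem.Chars.strip last)) (String.mk (PySem.Chars.strip build)),
          last, [])
      else (food, last, build) := by
  simp [pvStepA]

-- A's char fold equals the line loop
theorem pvMain : ∀ (n : Nat) (cs : List Char), cs.length ≤ n →
    ∀ (food : PySem.Dict String String) (last : List Char),
    (List.foldl pvStepA (food, last, []) cs).1 =
      pvLoopB food last (pvSplit1 '\n' cs []) := by
  intro n
  induction n with
  | zero =>
    intro cs h food last
    have hcs : cs = [] := by cases cs <;> simp_all
    subst hcs
    simp [pvSplit1, pvLoopB]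
  | succ n ih =>
    intro cs h food last
    by_cases hm : '\n' ∈ cs
    · obtain ⟨l, r, hl, rfl⟩ := pvFirstNl cs hm
      rw [List.foldl_append]
      rw [pvLineFold l hl food last []]
      rw [pvSplit1_append_sep '\n' l r hl []]
      simp only [List.reverse_nil, List.nil_append]
      obtain ⟨p2, ps2, hps⟩ : ∃ a b, pvSplit1 '\n' r [] = a :: b := by
        cases h' : pvSplit1 '\n' r [] with
        | nil => exact absurd h' (pvSplit1_ne_nil _ _ _)
        | cons a b => exact ⟨a, b, rfl⟩
      rw [hps]
      have hr : r.length ≤ n := by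
        have := h
        simp [List.length_append] at this
        omega
      have hLoop : pvLoopB food last (l :: p2 :: ps2) =
          pvLoopB
            (if (pvPartsOf l).getLastD [] ≠ [] then
              food.insert (String.mk (PySem.Chars.strip (pvNewLast last (pvPartsOf l))))
                (String.mk (PySem.Chars.strip ((pvPartsOf l).getLastD [])))
            else food) (pvNewLast last (pvPartsOf l)) (p2 :: ps2) := by
        simp [pvLoopB]
      rw [show pvSplit1 ']' (l.filter (fun x => !(x == '['))) [] = pvPartsOf l from rfl]
      simp only [List.foldl_cons]
      rw [pvStepA_nl]
      by_cases hv : (pvPartsOf l).getLastD [] = []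
      · rw [if_neg (not_ne_iff.mpr hv)] at hLoop
        rw [dif_neg (not_not_intro hv), hv]
        rw [ih r hr food (pvNewLast last (pvPartsOf l)), hps, hLoop]
      · rw [if_pos hv] at hLoop
        rw [dif_pos hv]
        rw [ih r hr _ (pvNewLast last (pvPartsOf l)), hps, hLoop]
    · rw [pvSplit1_no_sep '\n' cs hm []]
      rw [pvLineFold cs hm food last []]
      simp [pvLoopB]

theorem pvPyGetNeg1 {α : Type} (p : List α) (d : α) (h : p ≠ []) :
    (PySem.List.pyGet? p (-1)).getD d = p.getLastD d := by
  have hn : 1 ≤ p.length := List.length_pos_of_ne_nil h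
  simp only [PySem.List.pyGet?, PySem.List.pyIdx?]
  rw [if_neg (by omega), if_pos (by omega)]
  simp only [Option.bind_some]
  rw [List.getLastD_eq_getLast?, List.getLast?_eq_getElem?]
  rfl

theorem pvPyGetNeg2 {α : Type} (p : List α) (d : α) (h : 1 < p.length) :
    (PySem.List.pyGet? p (-2)).getD d = p.getD (p.length - 2) d := by
  simp only [PySem.List.pyGet?, PySem.List.pyIdx?]
  rw [if_neg (by omega), if_pos (by omega)]
  simp only [Option.bind_some]
  rw [List.getD_eq_getElem?_getD]
  rfl

theorem pvLastEq (parts : List (List Char)) (st2 : List Char) :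
    (if 1 < parts.length then (PySem.List.pyGet? parts (-2)).getD [] else st2)
      = pvNewLast st2 parts := by
  unfold pvNewLast
  by_cases h : 1 < parts.length
  · rw [if_pos h, if_pos h, pvPyGetNeg2 parts [] h]
  · rw [if_neg h, if_neg h]

-- B's indexed fold equals the line loop
theorem pvZip (n : Nat) : ∀ (ls : List (List Char)) (k : Nat)
    (food : PySem.Dict String String) (last : List Char), ls ≠ [] → k + ls.length = n →
    (List.foldl (pvStepB n) (food, last) (ls.zipIdx k)).1 = pvLoopB food last ls := by
  intro ls
  induction ls with
  | nil => intro k food last hne _; exact absurd rfl hne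
  | cons l ls ih =>
    intro k food last _ hk
    have hne2 : pvPartsOf l ≠ [] := pvSplit1_ne_nil ']' (l.filter (fun x => !(x == '['))) []
    have hparts : PySem.Chars.splitOn (PySem.Chars.replace l ['['] []) [']'] = pvPartsOf l := by
      rw [pvReplace_eq, pvSplitOn_eq]; rfl
    cases ls with
    | nil =>
      have hkn : ¬ (k < n - 1) := by simp at hk; omega
      simp only [List.zipIdx_cons, List.zipIdx_nil, List.foldl_cons, List.foldl_nil]
      have hstep : pvStepB n (food, last) (l, k) = (food, pvNewLast last (pvPartsOf l)) := by
        simp only [pvStepB, hparts, pvLastEq]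
        rw [if_neg (fun hcon => hkn hcon.1)]
      rw [hstep]
      simp [pvLoopB]
    | cons l2 ls2 =>
      have hkn : k < n - 1 := by simp at hk; omega
      rw [List.zipIdx_cons, List.foldl_cons]
      have hstep : pvStepB n (food, last) (l, k) =
          (if (pvPartsOf l).getLastD [] ≠ [] then
            food.insert (String.mk (PySem.Chars.strip (pvNewLast last (pvPartsOf l))))
              (String.mk (PySem.Chars.strip ((pvPartsOf l).getLastD [])))
          else food, pvNewLast last (pvPartsOf l)) := by
        simp only [pvStepB, hparts, pvLastEq]
        rw [pvPyGetNeg1 _ _ hne2]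
        by_cases hv : (pvPartsOf l).getLastD [] = []
        · rw [if_neg (fun hcon => hcon.2 hv), if_neg (not_ne_iff.mpr hv)]
        · rw [if_pos ⟨hkn, hv⟩, if_pos hv]
      have hLoop : pvLoopB food last (l :: l2 :: ls2) =
          pvLoopB
            (if (pvPartsOf l).getLastD [] ≠ [] then
              food.insert (String.mk (PySem.Chars.strip (pvNewLast last (pvPartsOf l))))
                (String.mk (PySem.Chars.strip ((pvPartsOf l).getLastD [])))
            else food) (pvNewLast last (pvPartsOf l)) (l2 :: ls2) := by
        simp [pvLoopB]
      rw [hstep, hLoop]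
      by_cases hv : (pvPartsOf l).getLastD [] = []
      · rw [if_neg (not_ne_iff.mpr hv)]
        exact ih (k+1) food (pvNewLast last (pvPartsOf l)) (by simp) (by simp at hk ⊢; omega)
      · rw [if_pos hv]
        exact ih (k+1) _ (pvNewLast last (pvPartsOf l)) (by simp) (by simp at hk ⊢; omega)

-- ===== VERDICT (by name: the statement is the Claim_ definition above) =====
theorem fix_bonapetit_spec : Claim_equal_fix_bonapetit := by
  intro thestr _
  unfold Spec_fix_bonapetit fix_bonapetit fix_bonapetit_alt
  rw [pvSplitOn_eq]
  have h1 := pvMain thestr.toList.length thestr.toList le_rfl PySem.Dict.empty []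
  have h2 := pvZip (pvSplit1 '\n' thestr.toList []).length (pvSplit1 '\n' thestr.toList []) 0
    PySem.Dict.empty [] (pvSplit1_ne_nil _ _ _) (by simp)
  rw [h1, ← h2]
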